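-- pv_equiv track=rewrite | github.com/RateTheory/PVMC-BED | bond_selection.py | sort_and_remove_duplicates
-- ===== SOURCE A (Python) =====
-- def sort_and_remove_duplicates(x, y):
--     # Zip x and y together
--     zipped = list(zip(x, y))
--
--     # Sort the zipped list based on the values of x
--     zipped.sort(key=lambda pair: pair[0])
--
--     # Initialize lists to store sorted x and y without duplicates
--     sorted_x = []
--     sorted_y = []
--
--     # Iterate through the sorted zipped list to remove duplicates
--     prev_x = None
--     for pair in zipped:
--         current_x, current_y = pair
--         if current_x != prev_x:
--             sorted_x.append(current_x)
--             sorted_y.append(current_y)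
--             prev_x = current_x
--
--     return sorted_x, sorted_y
-- ===== SOURCE B (Python) =====
-- def sort_and_remove_duplicates(x, y):
--     # keep the first y seen for each x, then sort the distinct pairs by x
--     first = {}
--     for xv, yv in zip(x, y):
--         first.setdefault(xv, yv)
--     items = sorted(first.items(), key=lambda p: p[0])
--     return [k for k, _ in items], [v for _, v in items]
-- ===== Notes on version B (the rewrite author's own statement) =====
-- stated objective: idiomatic
-- what changed: B deduplicates before sorting via a dict keyed by x (setdefault keeps the first occurrence's y), then sorts the distinct items once, instead of A's sort-everything-then-scan-with-a-prev-sentinel.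
import Mathlib
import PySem

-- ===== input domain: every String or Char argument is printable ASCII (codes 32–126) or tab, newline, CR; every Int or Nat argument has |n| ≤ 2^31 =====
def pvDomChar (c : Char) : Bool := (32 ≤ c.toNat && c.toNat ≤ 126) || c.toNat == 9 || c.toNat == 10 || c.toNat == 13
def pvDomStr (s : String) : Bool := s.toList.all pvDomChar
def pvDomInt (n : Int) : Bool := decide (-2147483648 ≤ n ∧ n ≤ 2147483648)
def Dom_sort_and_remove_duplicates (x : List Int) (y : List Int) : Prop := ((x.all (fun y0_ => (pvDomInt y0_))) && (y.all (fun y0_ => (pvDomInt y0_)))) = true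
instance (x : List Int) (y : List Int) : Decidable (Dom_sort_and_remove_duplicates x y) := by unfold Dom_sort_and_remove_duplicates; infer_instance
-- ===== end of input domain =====

-- B deduplicates first via a dict keyed by x (keeping the first y per x) and sorts the
-- distinct items once, instead of A's sort-everything-then-scan-with-a-prev-sentinel;
-- objective: idiomatic. Same return value everywhere; no claim about speed.

-- ===== PORT A =====
def sort_and_remove_duplicates (x : List Int) (y : List Int) : List Int × List Int :=
  -- zipped = list(zip(x, y)); zipped.sort(key=lambda pair: pair[0])  (stable)
  let zipped := x.zip y
  let zsorted := PySem.List.sorted zipped (fun pair => pair.1) false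
  -- the loop: state = (sorted_x, sorted_y, prev_x); prev_x = None ↦ none
  let r := zsorted.foldl
    (fun (st : List Int × List Int × Option Int) pair =>
      if some pair.1 ≠ st.2.2 then (st.1 ++ [pair.1], st.2.1 ++ [pair.2], some pair.1) else st)
    ([], [], none)
  (r.1, r.2.1)

-- ===== PORT B =====
def sort_and_remove_duplicates_alt (x : List Int) (y : List Int) : List Int × List Int :=
  -- first = {}; for xv, yv in zip(x, y): first.setdefault(xv, yv)
  let first := (x.zip y).foldl (fun d (p : Int × Int) => d.setdefault p.1 p.2)
    (PySem.Dict.empty : PySem.Dict Int Int)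
  -- items = sorted(first.items(), key=lambda p: p[0])
  let items := PySem.List.sorted first.items (fun p => p.1) false
  (items.map (fun p => p.1), items.map (fun p => p.2))

-- ===== PRECONDITION & SPEC =====
def Spec_sort_and_remove_duplicates (x : List Int) (y : List Int) (out : List Int × List Int) : Prop := out = sort_and_remove_duplicates_alt x y
instance (x : List Int) (y : List Int) (out : List Int × List Int) : Decidable (Spec_sort_and_remove_duplicates x y out) := by unfold Spec_sort_and_remove_duplicates; infer_instance

-- ===== CLAIM (what is proved, stated in full; the proofs are below) =====
def Claim_equal_sort_and_remove_duplicates : Prop := ∀ (x : List Int) (y : List Int), Dom_sort_and_remove_duplicates x y → Spec_sort_and_remove_duplicates x y (sort_and_remove_duplicates x y)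

-- ===== LEMMAS AND PROOFS =====

-- A's dedup scan, as a structural recursion (prev = key of the last kept pair)
def dedupK (prev : Option Int) : List (Int × Int) → List (Int × Int)
  | [] => []
  | p :: t => if some p.1 ≠ prev then p :: dedupK (some p.1) t else dedupK prev t

-- first occurrences by key, with an explicit "seen keys" accumulator
def foSeen (seen : List Int) : List (Int × Int) → List (Int × Int)
  | [] => []
  | p :: t => if p.1 ∈ seen then foSeen seen t else p :: foSeen (p.1 :: seen) t

lemma dedupK_subset : ∀ (prev : Option Int) (t : List (Int × Int)), dedupK prev t ⊆ t := by
  intro prev t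
  induction t generalizing prev with
  | nil => simp [dedupK]
  | cons a t' ih =>
    simp only [dedupK]
    split
    · intro z hz
      rcases List.mem_cons.mp hz with h1 | h1
      · simp [h1]
      · exact List.mem_cons_of_mem a (ih (some a.1) h1)
    · intro z hz; exact List.mem_cons_of_mem a (ih prev hz)

-- A's foldl loop computes dedupK
lemma foldl_dedup (S : List (Int × Int)) : ∀ (sx sy : List Int) (prev : Option Int),
    S.foldl
      (fun (st : List Int × List Int × Option Int) pair =>
        if some pair.1 ≠ st.2.2 then (st.1 ++ [pair.1], st.2.1 ++ [pair.2], some pair.1) else st)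
      (sx, sy, prev)
    = (sx ++ (dedupK prev S).map (fun p => p.1), sy ++ (dedupK prev S).map (fun p => p.2),
       S.foldl (fun pr pair => if some pair.1 ≠ pr then some pair.1 else pr) prev) := by
  induction S with
  | nil => simp [dedupK]
  | cons p t ih =>
    intro sx sy prev
    by_cases h : some p.1 ≠ prev
    · simp only [List.foldl_cons, dedupK, if_pos h, ih]
      simp
    · simp only [List.foldl_cons, dedupK, if_neg h, ih]

lemma insertBy_all_lt (p : Int × Int) (t : List (Int × Int)) (h : ∀ r ∈ t, p.1 < r.1) :
    PySem.List.insertBy (fun a b => decide (a.1 < b.1)) p t = p :: t := by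
  cases t with
  | nil => rfl
  | cons r t' => simp [PySem.List.insertBy, h r (by simp)]

-- inserting a pair whose key is already present does not change the dedup scan
lemma dedupK_insertBy_mem (p : Int × Int) :
    ∀ (S : List (Int × Int)) (prev : Option Int),
      S.Pairwise (fun a b => a.1 ≤ b.1) → p.1 ∈ S.map (fun q => q.1) →
      (∀ k, prev = some k → k ≤ p.1) →
      dedupK prev (PySem.List.insertBy (fun a b => decide (a.1 < b.1)) p S) = dedupK prev S := by
  intro S
  induction S with
  | nil => intro prev _ hm _; simp at hm
  | cons q t ih =>
    intro prev hpw hm hprev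
    have hpwt : t.Pairwise (fun a b => a.1 ≤ b.1) := hpw.sublist (List.sublist_cons_self q t)
    have hqle : ∀ r ∈ t, q.1 ≤ r.1 := fun r hr => (List.pairwise_cons.mp hpw).1 r hr
    by_cases hlt : p.1 < q.1
    · -- impossible: the key p.1 is below every key of q :: t
      exfalso
      simp only [List.map_cons, List.mem_cons, List.mem_map] at hm
      rcases hm with h1 | ⟨r, hr, hr1⟩
      · omega
      · have := hqle r hr; omega
    · -- insertBy descends past q
      have hins : PySem.List.insertBy (fun a b => decide (a.1 < b.1)) p (q :: t)
          = q :: PySem.List.insertBy (fun a b => decide (a.1 < b.1)) p t := by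
        simp [PySem.List.insertBy, hlt]
      rw [hins]
      by_cases hmem : p.1 ∈ t.map (fun r => r.1)
      · by_cases hq : some q.1 ≠ prev
        · simp only [dedupK, if_pos hq]
          rw [ih (some q.1) hpwt hmem (by intro k hk; injection hk with hk; omega)]
        · simp only [dedupK, if_neg hq]
          push Not at hq
          rw [ih prev hpwt hmem (by intro k hk; rw [← hq] at hk; injection hk with hk; omega)]
      · -- then p.1 = q.1 and every key of t is strictly above p.1
        have hpq : p.1 = q.1 := by
          simp only [List.map_cons, List.mem_cons] at hm
          tauto
        have hall : ∀ r ∈ t, p.1 < r.1 := by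
          intro r hr
          have h1 := hqle r hr
          have : r.1 ≠ p.1 := by
            intro hc; exact hmem (List.mem_map.mpr ⟨r, hr, hc⟩)
          omega
        rw [insertBy_all_lt p t hall]
        by_cases hq : some q.1 ≠ prev
        · simp only [dedupK, if_pos hq]
          simp [hpq]
        · simp only [dedupK, if_neg hq]
          push Not at hq
          simp [hpq, ← hq]

-- inserting a fresh key commutes with the dedup scan
lemma dedupK_insertBy_not_mem (p : Int × Int) :
    ∀ (S : List (Int × Int)) (prev : Option Int),
      S.Pairwise (fun a b => a.1 ≤ b.1) → p.1 ∉ S.map (fun q => q.1) →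
      (∀ k, prev = some k → k < p.1) →
      dedupK prev (PySem.List.insertBy (fun a b => decide (a.1 < b.1)) p S)
        = PySem.List.insertBy (fun a b => decide (a.1 < b.1)) p (dedupK prev S) := by
  intro S
  induction S with
  | nil =>
    intro prev _ _ hprev
    have hne : some p.1 ≠ prev := by
      intro hc; have := hprev p.1 hc.symm; omega
    simp [PySem.List.insertBy, dedupK, hne]
  | cons q t ih =>
    intro prev hpw hm hprev
    have hpwt : t.Pairwise (fun a b => a.1 ≤ b.1) := hpw.sublist (List.sublist_cons_self q t)
    have hqle : ∀ r ∈ t, q.1 ≤ r.1 := fun r hr => (List.pairwise_cons.mp hpw).1 r hr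
    have hpq : p.1 ≠ q.1 := by
      intro hc; exact hm (by simp [hc])
    have hmt : p.1 ∉ t.map (fun r => r.1) := by
      intro hc; exact hm (by simp at hc ⊢; tauto)
    by_cases hlt : p.1 < q.1
    · have hins : PySem.List.insertBy (fun a b => decide (a.1 < b.1)) p (q :: t) = p :: q :: t := by
        simp [PySem.List.insertBy, hlt]
      rw [hins]
      have hnep : some p.1 ≠ prev := by
        intro hc; have := hprev p.1 hc.symm; omega
      have hneq : some q.1 ≠ prev := by
        intro hc; have := hprev q.1 hc.symm; omega
      have hqp : some q.1 ≠ some p.1 := by simp; omega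
      simp only [dedupK, if_pos hnep, if_pos hqp, if_pos hneq]
      rw [insertBy_all_lt p (q :: dedupK (some q.1) t)]
      intro r hr
      rcases List.mem_cons.mp hr with h | h
      · subst h; omega
      · have : r ∈ t := dedupK_subset (some q.1) t h
        have := hqle r this; omega
    · have hins : PySem.List.insertBy (fun a b => decide (a.1 < b.1)) p (q :: t)
          = q :: PySem.List.insertBy (fun a b => decide (a.1 < b.1)) p t := by
        simp [PySem.List.insertBy, hlt]
      rw [hins]
      have hqlt : q.1 < p.1 := by omega
      by_cases hq : some q.1 ≠ prev
      · simp only [dedupK, if_pos hq]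
        rw [ih (some q.1) hpwt hmt (by intro k hk; injection hk with hk; omega)]
        have : ¬ ((fun (a b : Int × Int) => decide (a.1 < b.1)) p q = true) := by simp; omega
        simp [PySem.List.insertBy, this]
      · simp only [dedupK, if_neg hq]
        push Not at hq
        exact ih prev hpwt hmt hprev

-- foSeen depends on `seen` only through membership
lemma foSeen_congr : ∀ (L : List (Int × Int)) (s1 s2 : List Int),
    (∀ a, a ∈ s1 ↔ a ∈ s2) → foSeen s1 L = foSeen s2 L := by
  intro L
  induction L with
  | nil => intros; rfl
  | cons p t ih =>
    intro s1 s2 hset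
    by_cases h : p.1 ∈ s1
    · simp only [foSeen, if_pos h, if_pos ((hset p.1).mp h)]
      exact ih s1 s2 hset
    · simp only [foSeen, if_neg h, if_neg (fun hc => h ((hset p.1).mpr hc))]
      rw [ih (p.1 :: s1) (p.1 :: s2) (by intro a; simp [hset a])]

lemma foSeen_append_singleton : ∀ (L : List (Int × Int)) (seen : List Int) (p : Int × Int),
    foSeen seen (L ++ [p])
      = if p.1 ∈ seen ∨ p.1 ∈ L.map (fun q => q.1) then foSeen seen L else foSeen seen L ++ [p] := by
  intro L
  induction L with
  | nil =>
    intro seen p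
    by_cases h : p.1 ∈ seen <;> simp [foSeen, h]
  | cons q t ih =>
    intro seen p
    by_cases hq : q.1 ∈ seen
    · simp only [List.cons_append, foSeen, if_pos hq, ih]
      have : (p.1 ∈ seen ∨ p.1 ∈ t.map (fun r => r.1))
           ↔ (p.1 ∈ seen ∨ p.1 ∈ (q :: t).map (fun r => r.1)) := by
        simp only [List.map_cons, List.mem_cons]
        constructor
        · rintro (h | h)
          · exact Or.inl h
          · exact Or.inr (Or.inr h)
        · rintro (h | h | h)
          · exact Or.inl h
          · exact Or.inl (h ▸ hq)
          · exact Or.inr h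
      rw [if_congr this rfl rfl]
    · simp only [List.cons_append, foSeen, if_neg hq, ih]
      have : (p.1 ∈ q.1 :: seen ∨ p.1 ∈ t.map (fun r => r.1))
           ↔ (p.1 ∈ seen ∨ p.1 ∈ (q :: t).map (fun r => r.1)) := by
        simp only [List.mem_cons, List.map_cons]
        tauto
      rw [if_congr this rfl rfl]
      split <;> simp

-- B's dict-building loop computes foSeen over the dict's keys
lemma items_fold_setdefault : ∀ (L : List (Int × Int)) (d : PySem.Dict Int Int),
    (L.foldl (fun d (p : Int × Int) => d.setdefault p.1 p.2) d).items
      = d.items ++ foSeen d.keys L := by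
  intro L
  induction L with
  | nil => intro d; simp [foSeen]
  | cons p t ih =>
    intro d
    by_cases hc : d.contains p.1 = true
    · have hmem : p.1 ∈ d.keys := by
        rw [PySem.Dict.contains_eq_decide_mem_keys] at hc
        exact of_decide_eq_true hc
      simp only [List.foldl_cons, PySem.Dict.setdefault_of_contains d p.2 hc, ih,
        foSeen, if_pos hmem]
    · have hc' : d.contains p.1 = false := by simpa using hc
      have hmem : p.1 ∉ d.keys := by
        rw [PySem.Dict.contains_eq_decide_mem_keys] at hc'
        simpa using hc'
      rw [List.foldl_cons, PySem.Dict.setdefault_of_not_contains d p.2 hc', ih]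
      rw [PySem.Dict.items_insert_of_not_contains d p.2 hc']
      have hkeys : (d.insert p.1 p.2).keys = d.keys ++ [p.1] := by
        simp only [PySem.Dict.keys, PySem.Dict.items_insert_of_not_contains d p.2 hc', List.map_append]
        rfl
      rw [hkeys, foSeen_congr t (d.keys ++ [p.1]) (p.1 :: d.keys) (by intro a; simp; tauto)]
      simp [foSeen, if_neg hmem]

-- sorting one more element = insertBy into the sorted list
lemma sorted_append_singleton (L : List (Int × Int)) (p : Int × Int) :
    PySem.List.sorted (L ++ [p]) (fun q => q.1) false
      = PySem.List.insertBy (fun a b => decide (a.1 < b.1)) p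
          (PySem.List.sorted L (fun q => q.1) false) := by
  rw [PySem.List.sorted_eq_foldl_insertBy, PySem.List.sorted_eq_foldl_insertBy, List.foldl_append]
  rfl

-- the heart: A's scan of the stable sort = sort of the first occurrences
lemma dedup_sorted_eq_sorted_firstOcc : ∀ (L : List (Int × Int)),
    dedupK none (PySem.List.sorted L (fun q => q.1) false)
      = PySem.List.sorted (foSeen [] L) (fun q => q.1) false := by
  intro L
  induction L using List.reverseRecOn with
  | nil => rfl
  | append_singleton L p ih =>
    have hpw : (PySem.List.sorted L (fun q => q.1) false).Pairwise (fun a b => a.1 ≤ b.1) :=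
      PySem.List.sorted_pairwise L (fun q => q.1)
    have hmem_iff : p.1 ∈ (PySem.List.sorted L (fun q => q.1) false).map (fun q => q.1)
        ↔ p.1 ∈ L.map (fun q => q.1) :=
      ((PySem.List.sorted_perm L (fun q => q.1) false).map (fun q => q.1)).mem_iff
    rw [sorted_append_singleton, foSeen_append_singleton]
    by_cases hm : p.1 ∈ L.map (fun q => q.1)
    · rw [dedupK_insertBy_mem p _ none hpw (hmem_iff.mpr hm) (by intro k hk; cases hk), ih,
        if_pos (Or.inr hm)]
    · rw [dedupK_insertBy_not_mem p _ none hpw (fun hc => hm (hmem_iff.mp hc))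
        (by intro k hk; cases hk), ih, if_neg (by simpa using hm), sorted_append_singleton]

-- ===== VERDICT (by name: the statement is the Claim_ definition above) =====
theorem sort_and_remove_duplicates_spec : Claim_equal_sort_and_remove_duplicates := by
  unfold Claim_equal_sort_and_remove_duplicates
  intro x y _
  unfold Spec_sort_and_remove_duplicates sort_and_remove_duplicates sort_and_remove_duplicates_alt
  have hempty : (PySem.Dict.empty : PySem.Dict Int Int).items = [] := rfl
  have hkeys : (PySem.Dict.empty : PySem.Dict Int Int).keys = [] := rfl
  simp only [foldl_dedup, items_fold_setdefault, hempty, hkeys, List.nil_append]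
  rw [← dedup_sorted_eq_sorted_firstOcc]
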